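-- pv_equiv track=rewrite | github.com/dataesr/person-matcher | project/server/main/association_matcher_deprecated.py | get_main_modality
-- ===== SOURCE A (Python) =====
-- from collections import Counter
--
-- def get_main_modality(x):
--     cnt = Counter()
--     for e in x:
--         cnt[e] +=1
--     top_2 = cnt.most_common(2)
--     #assert(len(top_2) == 2)
--     if len(top_2) == 0:
--         return None
--     max_occurences = top_2[0][1]
--     if max_occurences < 2:
--         return None
--     if len(top_2)==2:
--         if top_2[0][1] > top_2[1][1]:
--             return top_2[0][0]
--     elif len(top_2)==1:
--         return top_2[0][0]
--     return None
-- ===== SOURCE B (Python) =====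
-- from collections import Counter
--
-- def get_main_modality(x):
--     best = None
--     best_count = 0
--     ties = 0
--     for k, c in Counter(x).items():
--         if c > best_count:
--             best, best_count, ties = k, c, 1
--         elif c == best_count:
--             ties += 1
--     if best_count >= 2 and ties == 1:
--         return best
--     return None
-- ===== Notes on version B (the rewrite author's own statement) =====
-- stated objective: simpler
-- what changed: Replaces most_common(2)'s sort-and-take-two selection by a single linear scan over the counter's items that tracks the running maximum count, its first key, and how many keys attain it, returning that key only when the maximum count is at least 2 and unique.
import Mathlib
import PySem

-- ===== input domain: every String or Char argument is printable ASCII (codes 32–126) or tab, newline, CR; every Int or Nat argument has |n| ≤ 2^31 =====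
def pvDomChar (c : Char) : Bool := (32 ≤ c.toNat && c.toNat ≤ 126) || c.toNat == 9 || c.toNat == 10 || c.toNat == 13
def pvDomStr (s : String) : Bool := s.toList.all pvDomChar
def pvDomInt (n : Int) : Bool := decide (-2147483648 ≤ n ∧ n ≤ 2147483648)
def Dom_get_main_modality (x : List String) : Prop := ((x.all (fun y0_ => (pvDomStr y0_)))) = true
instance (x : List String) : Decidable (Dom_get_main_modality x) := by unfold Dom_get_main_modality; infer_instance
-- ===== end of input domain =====

-- B replaces most_common(2)'s sort-and-take-two by a single linear scan of the counter's
-- items tracking the running maximum count, its first key, and how many keys attain it.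

-- ===== PORT A =====
-- cnt.most_common(2) = sorted(cnt.items(), key=itemgetter(1), reverse=True)[:2]
-- (Counter.most_common is documented as equivalent to this stable reverse sort).
def get_main_modality (x : List String) : Option String :=
  let cnt : PySem.Dict String Int := x.foldl (fun d e => d.modify e 0 (· + 1)) PySem.Dict.empty
  let top_2 := (PySem.List.sorted cnt.items (fun p => p.2) true).take 2
  match top_2 with
  | [] => none                                   -- len(top_2) == 0
  | (k0, c0) :: rest =>
    if c0 < 2 then none                          -- max_occurences < 2
    else match rest with
      | [(_, c1)] => if c0 > c1 then some k0 else none   -- len(top_2) == 2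
      | [] => some k0                                    -- len(top_2) == 1
      | _ => none                                        -- unreachable (take 2)

-- ===== PORT B =====
-- loop body of Source B: state is (best, best_count, ties)
def pvStep (s : Option String × Int × Int) (p : String × Int) : Option String × Int × Int :=
  if p.2 > s.2.1 then (some p.1, p.2, 1)
  else if p.2 == s.2.1 then (s.1, s.2.1, s.2.2 + 1)
  else s

def get_main_modality_alt (x : List String) : Option String :=
  let st := (PySem.Dict.counter x).items.foldl pvStep (none, 0, 0)
  if 2 ≤ st.2.1 ∧ st.2.2 = 1 then st.1 else none

-- ===== PRECONDITION & SPEC =====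
def Spec_get_main_modality (x : List String) (out : Option String) : Prop := out = get_main_modality_alt x
instance (x : List String) (out : Option String) : Decidable (Spec_get_main_modality x out) := by unfold Spec_get_main_modality; infer_instance

-- ===== CLAIM (what is proved, stated in full; the proofs are below) =====
def Claim_equal_get_main_modality : Prop := ∀ (x : List String), Dom_get_main_modality x → Spec_get_main_modality x (get_main_modality x)

-- ===== LEMMAS AND PROOFS =====

-- running maximum of the counts, 0 on []
def pvMx (l : List (String × Int)) : Int := (l.map (·.2)).foldl max 0

lemma pvMx_append (l : List (String × Int)) (p : String × Int) :
    pvMx (l ++ [p]) = max (pvMx l) p.2 := by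
  simp [pvMx, List.foldl_append]

lemma pvMx_le (l : List (String × Int)) {p : String × Int} (hp : p ∈ l) : p.2 ≤ pvMx l := by
  unfold pvMx
  exact (PySem.List.le_foldl_max (l.map (·.2)) 0).2 p.2 (List.mem_map_of_mem hp)

lemma pvMx_attained (l : List (String × Int)) : pvMx l = 0 ∨ ∃ p ∈ l, p.2 = pvMx l := by
  rcases PySem.List.foldl_max_mem (l.map (·.2)) 0 with h | h
  · exact Or.inl h
  · rcases List.mem_map.mp h with ⟨p, hp, hv⟩
    exact Or.inr ⟨p, hp, hv⟩

-- characterisation of B's scan on lists of positive counts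
lemma pvScan_char (l : List (String × Int)) (hpos : ∀ p ∈ l, 1 ≤ p.2) :
    l.foldl pvStep (none, 0, 0) =
      ((l.find? (fun p => p.2 == pvMx l)).map Prod.fst, pvMx l,
        (l.countP (fun p => p.2 == pvMx l) : Int)) := by
  induction l using List.reverseRecOn with
  | nil => simp [pvMx]
  | append_singleton l p ih =>
    have hpos' : ∀ q ∈ l, 1 ≤ q.2 := fun q hq => hpos q (List.mem_append_left _ hq)
    have hp1 : 1 ≤ p.2 := hpos p (List.mem_append_right _ (List.mem_singleton_self p))
    rw [List.foldl_append, ih hpos', pvMx_append]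
    rcases lt_trichotomy (pvMx l) p.2 with hlt | heq | hgt
    · -- new strict maximum
      have hmax : max (pvMx l) p.2 = p.2 := max_eq_right hlt.le
      rw [hmax]
      have hnone : l.find? (fun q => q.2 == p.2) = none := by
        rw [List.find?_eq_none]
        intro q hq
        simp only [beq_iff_eq]
        exact fun h => absurd (h ▸ pvMx_le l hq) (not_le.mpr hlt)
      have hcnt : l.countP (fun q => q.2 == p.2) = 0 := by
        rw [List.countP_eq_zero]
        intro q hq
        simp only [beq_iff_eq]
        exact fun h => absurd (h ▸ pvMx_le l hq) (not_le.mpr hlt)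
      simp [pvStep, hlt, List.find?_append, hnone, List.countP_append, hcnt]
    · -- equal to the old maximum (which is therefore positive and attained)
      have hmax : max (pvMx l) p.2 = pvMx l := by omega
      rw [hmax]
      have hsome : (l.find? (fun q => q.2 == pvMx l)).isSome := by
        rcases pvMx_attained l with h0 | ⟨q, hq, hv⟩
        · omega
        · exact List.find?_isSome.mpr ⟨q, hq, by simp [hv]⟩
      rcases Option.isSome_iff_exists.mp hsome with ⟨r, hr⟩
      rw [heq] at hr ⊢
      simp [pvStep, List.find?_append, hr, List.countP_append]
    · -- below the old maximum: no change
      have hmax : max (pvMx l) p.2 = pvMx l := max_eq_left hgt.le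
      rw [hmax]
      have hne : ¬ p.2 = pvMx l := by omega
      have hnlt : ¬ p.2 > pvMx l := by omega
      simp [pvStep, hnlt, hne, List.find?_append, List.countP_append]

-- if exactly one element of l satisfies the predicate, any two satisfying members coincide
lemma pv_unique_of_countP_one {α : Type} {l : List α} {pr : α → Bool}
    (h1 : l.countP pr = 1) {a b : α} (ha : a ∈ l) (hb : b ∈ l)
    (hpa : pr a = true) (hpb : pr b = true) : a = b := by
  have hfa : a ∈ l.filter pr := List.mem_filter.mpr ⟨ha, hpa⟩
  have hfb : b ∈ l.filter pr := List.mem_filter.mpr ⟨hb, hpb⟩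
  rw [List.countP_eq_length_filter] at h1
  rcases List.length_eq_one_iff.mp h1 with ⟨c, hc⟩
  rw [hc] at hfa hfb
  simp only [List.mem_singleton] at hfa hfb
  rw [hfa, hfb]

lemma pv_main (x : List String) : get_main_modality x = get_main_modality_alt x := by
  have hcnt : (x.foldl (fun d e => d.modify e 0 (· + 1)) PySem.Dict.empty : PySem.Dict String Int)
      = PySem.Dict.counter x := (PySem.Dict.counter_eq_foldl x).symm
  have hpos : ∀ p ∈ (PySem.Dict.counter x).items, 1 ≤ p.2 := by
    intro p hp
    rw [PySem.Dict.items_counter] at hp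
    rcases List.mem_map.mp hp with ⟨k, hk, rfl⟩
    have : k ∈ x := (PySem.Set.mem_ofList x k).mp hk
    have := List.count_pos_iff.mpr this
    simp only
    omega
  simp only [get_main_modality, get_main_modality_alt]
  rw [hcnt]
  generalize hI : (PySem.Dict.counter x).items = items
  rw [hI] at hpos
  rw [pvScan_char items hpos]
  rcases hs : PySem.List.sorted items (fun p => p.2) true with _ | ⟨p, rest⟩
  · -- items empty
    have : items = [] := (PySem.List.sorted_eq_nil_iff _ _ _).mp hs
    simp [this, pvMx]
  · have hperm : (p :: rest).Perm items := hs ▸ PySem.List.sorted_perm items (fun p => p.2) true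
    have hpmem : p ∈ items := hperm.mem_iff.mp (List.mem_cons_self)
    have hhead : ∀ y ∈ items, y.2 ≤ p.2 := PySem.List.key_head_sorted_rev_ge items (fun p => p.2) hs
    have hMx : pvMx items = p.2 := by
      have h1 : p.2 ≤ pvMx items := pvMx_le items hpmem
      have h2 : pvMx items ≤ p.2 := by
        rcases pvMx_attained items with h0 | ⟨q, hq, hv⟩
        · have := hpos p hpmem; omega
        · exact hv ▸ hhead q hq
      omega
    have hp2 : 1 ≤ p.2 := hpos p hpmem
    have hcountP : items.countP (fun q => q.2 == p.2) = (p :: rest).countP (fun q => q.2 == p.2) :=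
      (hperm.countP_eq _).symm
    rcases rest with _ | ⟨q, rest'⟩
    · -- single distinct element
      have hone : items = [p] := List.perm_singleton.mp hperm.symm
      rw [hMx, hcountP, hone]
      rcases p with ⟨k0, c0⟩
      by_cases h2 : c0 < 2
      · simp [h2]
      · simp [h2, (by omega : (2:Int) ≤ c0)]
    · -- at least two distinct elements
      have hqmem : q ∈ items := hperm.mem_iff.mp (List.mem_cons_of_mem _ List.mem_cons_self)
      have hqp : q.2 ≤ p.2 := hhead q hqmem
      rw [hMx, hcountP]
      by_cases htie : q.2 = p.2
      · -- top-count tie: both return None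
        have hc2 : 2 ≤ (p :: q :: rest').countP (fun r => r.2 == p.2) := by
          simp only [List.countP_cons, htie, beq_self_eq_true, if_pos]
          omega
        have hfalse : ¬ ((2:Int) ≤ p.2 ∧ (((p :: q :: rest').countP (fun r => r.2 == p.2) : Int)) = 1) := by
          rintro ⟨-, h⟩
          omega
        rw [if_neg hfalse]
        rcases p with ⟨k0, c0⟩
        rcases q with ⟨k1, c1⟩
        simp only at htie
        by_cases h2 : c0 < 2
        · simp [h2]
        · simp [h2, htie]
      · -- strict maximum: unique top element
        have hlt : q.2 < p.2 := lt_of_le_of_ne hqp htie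
        have hrest : ∀ r ∈ rest', r.2 ≤ q.2 := by
          have hpw := PySem.List.sorted_pairwise_rev items (fun p => p.2)
          rw [hs] at hpw
          exact fun r hr => (List.pairwise_cons.mp (List.pairwise_cons.mp hpw).2).1 r hr
        have hcnt1 : (p :: q :: rest').countP (fun r => r.2 == p.2) = 1 := by
          rw [List.countP_cons, List.countP_cons]
          have h0 : rest'.countP (fun r => r.2 == p.2) = 0 := by
            rw [List.countP_eq_zero]
            intro r hr
            have := hrest r hr
            simp only [beq_iff_eq]
            omega
          simp [h0, htie]
        have hcnt1' : items.countP (fun r => r.2 == p.2) = 1 := by rw [hcountP]; exact hcnt1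
        have hsome : (items.find? (fun r => r.2 == p.2)).isSome :=
          List.find?_isSome.mpr ⟨p, hpmem, by simp⟩
        rcases Option.isSome_iff_exists.mp hsome with ⟨r, hr⟩
        have hrmem : r ∈ items := List.mem_of_find?_eq_some hr
        have hrp : (r.2 == p.2) = true := List.find?_some (p := fun q : String × Int => q.2 == p.2) hr
        have hreq : r = p := pv_unique_of_countP_one (pr := fun r => r.2 == p.2) hcnt1' hrmem hpmem hrp (by simp)
        rw [hr, hreq, hcnt1]
        rcases p with ⟨k0, c0⟩
        simp only at hlt
        by_cases h2 : c0 < 2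
        · simp [h2]
        · simp [h2, hlt, (by omega : (2:Int) ≤ c0)]

-- ===== VERDICT (by name: the statement is the Claim_ definition above) =====
theorem get_main_modality_spec : Claim_equal_get_main_modality := by
  intro x _
  unfold Spec_get_main_modality
  exact pv_main x
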